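-- pv_equiv track=rewrite | github.com/ECBSU/genomics-scripts | Functional-annotation/KEGG_pathways/in-house_KEGG_annotation/KEGGstand_python_scripts/KEGGstand_module_checker.py | find_bracket_pairs
-- ===== SOURCE A (Python) =====
-- def find_bracket_pairs(string):
--     """
--     Returns a dictionary for each bracket pair, where the first bracket
--     is the dict key, and the second is the value
--     """
--     match_bracket_index_dict = {}
--     stack_list = []
--     for index, char in enumerate(string):
--         if char == "(":
--             stack_list.append(index)
--         elif char == ")":
--             match_bracket_index_dict[stack_list.pop()] = index
--     return dict(sorted(match_bracket_index_dict.items()))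
-- ===== SOURCE B (Python) =====
-- def find_bracket_pairs(string):
--     """
--     Returns a dictionary for each bracket pair, where the first bracket
--     is the dict key, and the second is the value
--     """
--     pairs = []
--
--     def parse(i):
--         # Scan from index i; return the index of the unmatched ')' that
--         # ends this nesting level, or len(string) if the string runs out.
--         while i < len(string):
--             char = string[i]
--             if char == "(":
--                 j = parse(i + 1)
--                 if j < len(string):
--                     pairs.append((i, j))
--                     i = j + 1
--                 else:
--                     return j  # unmatched '(' : no pair recorded
--             elif char == ")":
--                 return i
--             else:
--                 i += 1
--         return i
--
--     i = 0
--     while i < len(string):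
--         i = parse(i) + 1  # a stray top-level ')' is skipped
--     return dict(sorted(pairs))
-- ===== Notes on version B (the rewrite author's own statement) =====
-- stated objective: alternative
-- what changed: A's single pass with an explicit stack of open indices is replaced by a recursive-descent parser over the nesting structure (a helper that scans from an index and recurses into each '('), collecting pairs and returning dict(sorted(pairs)) like A.
import Mathlib
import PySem

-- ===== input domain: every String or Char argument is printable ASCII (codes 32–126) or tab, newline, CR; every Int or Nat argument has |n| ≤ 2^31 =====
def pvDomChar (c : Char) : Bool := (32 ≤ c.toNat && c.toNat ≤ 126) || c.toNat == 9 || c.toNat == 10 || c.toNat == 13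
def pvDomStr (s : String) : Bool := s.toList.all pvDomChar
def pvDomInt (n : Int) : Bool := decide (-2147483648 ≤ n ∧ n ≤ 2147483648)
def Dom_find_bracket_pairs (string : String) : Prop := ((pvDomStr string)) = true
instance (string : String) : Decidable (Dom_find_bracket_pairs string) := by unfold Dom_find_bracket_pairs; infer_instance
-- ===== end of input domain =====

-- B replaces A's explicit open-index stack with a recursive-descent parser over the nesting
-- structure (objective: alternative decomposition; same result, cost dominated by the final sort).

-- ===== PORT A =====
-- A-side helper: the body of A's for-loop (push an open index / pop one and record the pair).
def pvStepA (st : PySem.Dict Int Int × List Int) (p : Int × Char) : PySem.Dict Int Int × List Int :=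
  if p.2 = '(' then (st.1, st.2 ++ [p.1])
  else if p.2 = ')' then
    match PySem.List.pop? st.2 with
    | some (x, rest) => (st.1.insert x p.1, rest)
    | none => (st.1, st.2)  -- Python raises IndexError here; excluded by Pre_
  else st

def find_bracket_pairs (string : String) : List (Int × Int) :=
  let r := (PySem.List.enumerate string.toList 0).foldl pvStepA (PySem.Dict.empty, [])
  -- dict keys are distinct, so Python's lexicographic sorted(d.items()) is exactly sorting by the key component
  PySem.List.sorted r.1.items (fun p => p.1) false

-- ===== PORT B =====
-- B-side helper: Source B's `parse(i)` — the while loop becomes tail recursion, the nested call stays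
-- a call; fuel (always > len - i at every call) only makes the recursion structural.
def pvParseB (cs : List Char) : Nat → Nat → List (Nat × Nat) × Nat
  | 0, i => ([], i)
  | f+1, i =>
    if h : i < cs.length then
      if cs[i] = '(' then
        let (ps, j) := pvParseB cs f (i+1)
        if j < cs.length then
          let (ps', r) := pvParseB cs f (j+1)
          (ps ++ (i, j) :: ps', r)
        else (ps, j)
      else if cs[i] = ')' then ([], i)
      else pvParseB cs f (i+1)
    else ([], i)

-- Source B's top-level while loop (same fuel discipline).
def pvTopB (cs : List Char) : Nat → Nat → List (Nat × Nat)
  | 0, _ => []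
  | f+1, i =>
    if i < cs.length then
      let (ps, j) := pvParseB cs (cs.length + 1) i
      ps ++ pvTopB cs f (j + 1)
    else []

def find_bracket_pairs_alt (string : String) : List (Int × Int) :=
  let cs := string.toList
  let pairs := pvTopB cs (cs.length + 1) 0
  -- dict(sorted(pairs)): open indices are distinct, so sorting by the first component is exact
  PySem.List.sorted (pairs.map (fun p => ((p.1 : Int), (p.2 : Int)))) (fun p => p.1) false

-- ===== PRECONDITION & SPEC =====
-- Pre_ excludes exactly the strings with a prefix holding more ')' than '(' : there A's
-- stack_list.pop() raises IndexError (A returns normally on every other string).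
def Pre_find_bracket_pairs (string : String) : Prop :=
  ∀ k : Nat, k ≤ string.toList.length →
    (string.toList.take k).count ')' ≤ (string.toList.take k).count '('
instance (string : String) : Decidable (Pre_find_bracket_pairs string) := by
  unfold Pre_find_bracket_pairs; infer_instance

def pvWitness_find_bracket_pairs : String := "a(b(c)d)()"

def Spec_find_bracket_pairs (string : String) (out : List (Int × Int)) : Prop := out = find_bracket_pairs_alt string
instance (string : String) (out : List (Int × Int)) : Decidable (Spec_find_bracket_pairs string out) := by unfold Spec_find_bracket_pairs; infer_instance

-- ===== CLAIM (what is proved, stated in full; the proofs are below) =====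
def Claim_equal_find_bracket_pairs : Prop := ∀ (string : String), Dom_find_bracket_pairs string → Pre_find_bracket_pairs string → Spec_find_bracket_pairs string (find_bracket_pairs string)

-- ===== LEMMAS AND PROOFS =====

-- Proof-side pure twin of A's loop: the dict is replaced by the plain list of recorded pairs.
def pvStepP (st : List (Int × Int) × List Int) (p : Int × Char) : List (Int × Int) × List Int :=
  if p.2 = '(' then (st.1, st.2 ++ [p.1])
  else if p.2 = ')' then
    match PySem.List.pop? st.2 with
    | some (x, rest) => (st.1 ++ [(x, p.1)], rest)
    | none => st
  else st

-- the slice cs[i:j], and its enumeration with true indices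
def pvSeg (cs : List Char) (i j : Nat) : List Char := (cs.drop i).take (j - i)
def pvESeg (cs : List Char) (i j : Nat) : List (Int × Char) :=
  PySem.List.enumerate (pvSeg cs i j) i

theorem pvStepP_shift (ps : List (Int × Int)) (st : List Int) (p : Int × Char) :
    pvStepP (ps, st) p = (ps ++ (pvStepP ([], st) p).1, (pvStepP ([], st) p).2) := by
  unfold pvStepP
  split_ifs <;> simp
  cases PySem.List.pop? st <;> simp

theorem pvShiftP (l : List (Int × Char)) (ps : List (Int × Int)) (st : List Int) :
    l.foldl pvStepP (ps, st) =
      (ps ++ (l.foldl pvStepP ([], st)).1, (l.foldl pvStepP ([], st)).2) := by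
  induction l generalizing ps st with
  | nil => simp
  | cons p l ih =>
    simp only [List.foldl_cons]
    rw [pvStepP_shift ps st p]
    rw [ih (ps ++ (pvStepP ([], st) p).1) (pvStepP ([], st) p).2]
    have h2 := ih (pvStepP ([], st) p).1 (pvStepP ([], st) p).2
    rw [Prod.mk.eta] at h2
    rw [h2]
    simp

theorem pvSeg_refl (cs : List Char) (i : Nat) : pvSeg cs i i = [] := by
  simp [pvSeg]

theorem pvSeg_single (cs : List Char) (i : Nat) (h : i < cs.length) :
    pvSeg cs i (i+1) = [cs[i]] := by
  unfold pvSeg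
  rw [show i+1-i = 1 by omega, List.drop_eq_getElem_cons h]
  rfl

theorem pvSeg_split (cs : List Char) (i m j : Nat) (h1 : i ≤ m) (h2 : m ≤ j)
    (_h3 : m ≤ cs.length) : pvSeg cs i j = pvSeg cs i m ++ pvSeg cs m j := by
  unfold pvSeg
  rw [show j - i = (m - i) + (j - m) by omega, List.take_add, List.drop_drop,
      show i + (m - i) = m by omega]

theorem pvSeg_length (cs : List Char) (i m : Nat) (_h1 : i ≤ m) (h3 : m ≤ cs.length) :
    (pvSeg cs i m).length = m - i := by
  simp [pvSeg]; omega

theorem pvESeg_refl (cs : List Char) (i : Nat) : pvESeg cs i i = [] := by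
  simp [pvESeg, pvSeg_refl]

theorem pvESeg_single (cs : List Char) (i : Nat) (h : i < cs.length) :
    pvESeg cs i (i+1) = [((i : Int), cs[i])] := by
  simp [pvESeg, pvSeg_single cs i h, PySem.List.enumerate]

theorem pvESeg_split (cs : List Char) (i m j : Nat) (h1 : i ≤ m) (h2 : m ≤ j)
    (h3 : m ≤ cs.length) : pvESeg cs i j = pvESeg cs i m ++ pvESeg cs m j := by
  unfold pvESeg
  rw [pvSeg_split cs i m j h1 h2 h3, PySem.List.enumerate_append,
      pvSeg_length cs i m h1 h3]
  congr 2
  omega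

theorem pvChunk (cs : List Char) :
    ∀ (f i : Nat) (st : List Int), cs.length < f + i → i ≤ cs.length →
    i ≤ (pvParseB cs f i).2 ∧ (pvParseB cs f i).2 ≤ cs.length ∧
    ∃ extra : List Int,
      ((pvESeg cs i (pvParseB cs f i).2).foldl pvStepP ([], st)).2 = st ++ extra
      ∧ ((pvESeg cs i (pvParseB cs f i).2).foldl pvStepP ([], st)).1.Perm
          ((pvParseB cs f i).1.map (fun p => ((p.1 : Int), (p.2 : Int))))
      ∧ (∀ hlt : (pvParseB cs f i).2 < cs.length,
            extra = [] ∧ cs[(pvParseB cs f i).2]'hlt = ')')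
      ∧ (pvSeg cs i (pvParseB cs f i).2).count '('
          = (pvSeg cs i (pvParseB cs f i).2).count ')' + extra.length := by
  intro f
  induction f with
  | zero => intro i st hf hi; exact absurd hi (by omega)
  | succ f ih =>
    intro i st hf hi
    by_cases h : i < cs.length
    · by_cases hc1 : cs[i] = '('
      · rcases hp : pvParseB cs f (i+1) with ⟨ps, j1⟩
        have ih1 := ih (i+1) (st ++ [(i : Int)]) (by omega) (by omega)
        rw [hp] at ih1
        dsimp only at ih1
        obtain ⟨hij1, hj1n, extra1, he1, hperm1, hlt1, hcnt1⟩ := ih1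
        by_cases hj : j1 < cs.length
        · rcases hq : pvParseB cs f (j1+1) with ⟨ps', j2⟩
          have ih2 := ih (j1+1) st (by omega) (by omega)
          rw [hq] at ih2
          dsimp only at ih2
          obtain ⟨hj1j2, hj2n, extra2, he2, hperm2, hlt2, hcnt2⟩ := ih2
          obtain ⟨hex1, hcj1⟩ := hlt1 hj
          subst hex1
          rw [List.append_nil] at he1
          have hres : pvParseB cs (f+1) i = (ps ++ (i, j1) :: ps', j2) := by
            simp [pvParseB, h, hc1, hp, hj, hq]
          rw [hres]
          have hsplit : pvESeg cs i j2
              = pvESeg cs i (i+1) ++ (pvESeg cs (i+1) j1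
                ++ (pvESeg cs j1 (j1+1) ++ pvESeg cs (j1+1) j2)) := by
            rw [pvESeg_split cs i (i+1) j2 (by omega) (by omega) (by omega),
                pvESeg_split cs (i+1) j1 j2 (by omega) (by omega) (by omega),
                pvESeg_split cs j1 (j1+1) j2 (by omega) (by omega) (by omega)]
          have hcomp : (pvESeg cs i j2).foldl pvStepP ([], st)
              = (((pvESeg cs (i+1) j1).foldl pvStepP ([], st ++ [(i:Int)])).1
                  ++ ((i:Int), (j1:Int))
                  :: ((pvESeg cs (j1+1) j2).foldl pvStepP ([], st)).1,
                 ((pvESeg cs (j1+1) j2).foldl pvStepP ([], st)).2) := by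
            rw [hsplit]
            simp only [List.foldl_append]
            rw [pvESeg_single cs i h, pvESeg_single cs j1 hj]
            simp only [List.foldl_cons, List.foldl_nil]
            have s1 : pvStepP ([], st) ((i : Int), cs[i]) = ([], st ++ [(i:Int)]) := by
              simp [pvStepP, hc1]
            rw [s1]
            have hr1 : (pvESeg cs (i+1) j1).foldl pvStepP ([], st ++ [(i:Int)])
                = (((pvESeg cs (i+1) j1).foldl pvStepP ([], st ++ [(i:Int)])).1,
                   st ++ [(i:Int)]) := by
              rw [Prod.ext_iff]; exact ⟨rfl, he1⟩
            rw [hr1]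
            have s3 : pvStepP
                ((((pvESeg cs (i+1) j1).foldl pvStepP ([], st ++ [(i:Int)])).1),
                  st ++ [(i:Int)]) ((j1 : Int), cs[j1])
                = (((pvESeg cs (i+1) j1).foldl pvStepP ([], st ++ [(i:Int)])).1
                    ++ [((i:Int), (j1:Int))], st) := by
              simp [pvStepP, hcj1, PySem.List.pop?_last]
            rw [s3, pvShiftP (pvESeg cs (j1+1) j2) _ st]
            simp
          refine ⟨by omega, by omega, extra2, ?_, ?_, ?_, ?_⟩
          · rw [hcomp]; exact he2
          · rw [hcomp]
            simp only [List.map_append, List.map_cons]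
            exact hperm1.append (hperm2.cons _)
          · intro hlt; exact hlt2 hlt
          · rw [pvSeg_split cs i (i+1) j2 (by omega) (by omega) (by omega),
                pvSeg_split cs (i+1) j1 j2 (by omega) (by omega) (by omega),
                pvSeg_split cs j1 (j1+1) j2 (by omega) (by omega) (by omega),
                pvSeg_single cs i h, pvSeg_single cs j1 hj]
            simp only [List.count_append, List.count_cons, List.count_nil]
            simp only [List.length_nil] at hcnt1
            simp [hc1, hcj1]
            omega
        · have hres : pvParseB cs (f+1) i = (ps, j1) := by
            simp [pvParseB, h, hc1, hp, hj]
          rw [hres]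
          refine ⟨by omega, by omega, (i:Int) :: extra1, ?_, ?_, ?_, ?_⟩
          · rw [pvESeg_split cs i (i+1) j1 (by omega) (by omega) (by omega)]
            simp only [List.foldl_append]
            rw [pvESeg_single cs i h]
            simp only [List.foldl_cons, List.foldl_nil]
            have s1 : pvStepP ([], st) ((i : Int), cs[i]) = ([], st ++ [(i:Int)]) := by
              simp [pvStepP, hc1]
            rw [s1, he1]
            simp
          · rw [pvESeg_split cs i (i+1) j1 (by omega) (by omega) (by omega)]
            simp only [List.foldl_append]
            rw [pvESeg_single cs i h]
            simp only [List.foldl_cons, List.foldl_nil]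
            have s1 : pvStepP ([], st) ((i : Int), cs[i]) = ([], st ++ [(i:Int)]) := by
              simp [pvStepP, hc1]
            rw [s1]
            exact hperm1
          · intro hlt; exact absurd hlt hj
          · rw [pvSeg_split cs i (i+1) j1 (by omega) (by omega) (by omega),
                pvSeg_single cs i h]
            simp only [List.count_append, List.count_cons, List.count_nil]
            simp [hc1]
            omega
      · by_cases hc2 : cs[i] = ')'
        · have hres : pvParseB cs (f+1) i = ([], i) := by
            simp [pvParseB, h, hc2]
          rw [hres]
          refine ⟨le_refl i, by omega, [], ?_, ?_, ?_, ?_⟩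
          · rw [pvESeg_refl]; simp
          · rw [pvESeg_refl]; simp
          · intro hlt; exact ⟨rfl, hc2⟩
          · simp [pvSeg_refl]
        · rcases hp : pvParseB cs f (i+1) with ⟨ps, j1⟩
          have ih1 := ih (i+1) st (by omega) (by omega)
          rw [hp] at ih1
          dsimp only at ih1
          obtain ⟨hij1, hj1n, extra1, he1, hperm1, hlt1, hcnt1⟩ := ih1
          have hres : pvParseB cs (f+1) i = (ps, j1) := by
            simp [pvParseB, h, hc1, hc2, hp]
          rw [hres]
          refine ⟨by omega, by omega, extra1, ?_, ?_, ?_, ?_⟩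
          · rw [pvESeg_split cs i (i+1) j1 (by omega) (by omega) (by omega)]
            simp only [List.foldl_append]
            rw [pvESeg_single cs i h]
            simp only [List.foldl_cons, List.foldl_nil]
            have s1 : pvStepP ([], st) ((i : Int), cs[i]) = ([], st) := by
              simp [pvStepP, hc1, hc2]
            rw [s1]
            exact he1
          · rw [pvESeg_split cs i (i+1) j1 (by omega) (by omega) (by omega)]
            simp only [List.foldl_append]
            rw [pvESeg_single cs i h]
            simp only [List.foldl_cons, List.foldl_nil]
            have s1 : pvStepP ([], st) ((i : Int), cs[i]) = ([], st) := by
              simp [pvStepP, hc1, hc2]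
            rw [s1]
            exact hperm1
          · exact hlt1
          · rw [pvSeg_split cs i (i+1) j1 (by omega) (by omega) (by omega),
                pvSeg_single cs i h]
            simp only [List.count_append, List.count_cons, List.count_nil]
            simp [hc1, hc2]
            omega
    · have hres : pvParseB cs (f+1) i = ([], i) := by
        simp [pvParseB, h]
      rw [hres]
      refine ⟨le_refl i, hi, [], ?_, ?_, ?_, ?_⟩
      · rw [pvESeg_refl]; simp
      · rw [pvESeg_refl]; simp
      · intro hlt; exact absurd hlt h
      · simp [pvSeg_refl]

theorem pvAbstr (cs : List Char) (k : Int) (d : PySem.Dict Int Int) (st : List Int)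
    (h1 : st.Nodup) (h2 : d.keys.Nodup) (h3 : ∀ x ∈ st, x < k) (h4 : ∀ x ∈ d.keys, x < k)
    (h5 : ∀ x ∈ st, x ∉ d.keys) :
    ((PySem.List.enumerate cs k).foldl pvStepA (d, st)).1.items
        = d.items ++ ((PySem.List.enumerate cs k).foldl pvStepP ([], st)).1
    ∧ ((PySem.List.enumerate cs k).foldl pvStepA (d, st)).2
        = ((PySem.List.enumerate cs k).foldl pvStepP ([], st)).2
    ∧ ((PySem.List.enumerate cs k).foldl pvStepA (d, st)).1.keys.Nodup := by
  induction cs generalizing k d st with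
  | nil => simpa [PySem.List.enumerate] using h2
  | cons c cs ih =>
    rw [PySem.List.enumerate_cons]
    simp only [List.foldl_cons]
    by_cases hc1 : c = '('
    · have hA : pvStepA (d, st) (k, c) = (d, st ++ [k]) := by simp [pvStepA, hc1]
      have hP : pvStepP ([], st) (k, c) = ([], st ++ [k]) := by simp [pvStepP, hc1]
      rw [hA, hP]
      exact ih (k+1) d (st ++ [k])
        (by rw [List.nodup_append]
            refine ⟨h1, by simp, ?_⟩
            intro a ha b hb
            have := h3 a ha
            simp at hb; subst hb
            omega)
        h2
        (by intro x hx; rcases List.mem_append.1 hx with h | h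
            · exact lt_trans (h3 x h) (by omega)
            · simp at h; omega)
        (fun x hx => lt_trans (h4 x hx) (by omega))
        (by intro x hx; rcases List.mem_append.1 hx with h | h
            · exact h5 x h
            · simp at h; subst h; intro hk; exact absurd (h4 x hk) (by omega))
    · by_cases hc2 : c = ')'
      · rcases List.eq_nil_or_concat st with rfl | ⟨st', x, rfl⟩
        · have hA : pvStepA (d, []) (k, c) = (d, []) := by
            simp [pvStepA, hc2, PySem.List.pop?]
          have hP : pvStepP ([], []) (k, c) = ([], []) := by
            simp [pvStepP, hc2, PySem.List.pop?]
          rw [hA, hP]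
          exact ih (k+1) d [] (by simp) h2 (by simp)
            (fun x hx => lt_trans (h4 x hx) (by omega)) (by simp)
        · simp only [List.concat_eq_append] at h1 h3 h5 ⊢
          have hxst : x ∈ st' ++ [x] := by simp
          have hxk : x ∉ d.keys := h5 x hxst
          have hcont : d.contains x = false := by
            rcases h : d.contains x; · rfl
            · exact absurd ((PySem.Dict.contains_iff_mem_keys d x).1 h) hxk
          have hA : pvStepA (d, st' ++ [x]) (k, c) = (d.insert x k, st') := by
            simp [pvStepA, hc2, PySem.List.pop?_last]
          have hP : pvStepP ([], st' ++ [x]) (k, c) = ([(x, k)], st') := by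
            simp [pvStepP, hc2, PySem.List.pop?_last]
          rw [hA, hP]
          have hkeys : (d.insert x k).keys = d.keys ++ [x] :=
            PySem.Dict.keys_insert_of_not_contains d k hcont
          have hnodup' : st'.Nodup := (List.nodup_append.1 h1).1
          have hxnst' : x ∉ st' := by
            rw [List.nodup_append] at h1
            intro hmem; exact h1.2.2 x hmem x (by simp) rfl
          have ihres := ih (k+1) (d.insert x k) st' hnodup'
            (by rw [hkeys, List.nodup_append]
                refine ⟨h2, by simp, ?_⟩
                intro a ha b hb; simp at hb; subst hb
                exact fun h => hxk (h ▸ ha))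
            (by intro y hy; exact lt_trans (h3 y (by simp [hy])) (by omega))
            (by intro y hy; rw [hkeys] at hy; rcases List.mem_append.1 hy with h | h
                · exact lt_trans (h4 y h) (by omega)
                · simp at h; subst h; exact lt_trans (h3 y hxst) (by omega))
            (by intro y hy; rw [hkeys]; intro hmem
                rcases List.mem_append.1 hmem with h | h
                · exact h5 y (by simp [hy]) h
                · simp at h; subst h; exact hxnst' hy)
          have hitems : (d.insert x k).items = d.items ++ [(x, k)] :=
            PySem.Dict.items_insert_of_not_contains d k hcont
          refine ⟨?_, ?_, ihres.2.2⟩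
          · rw [ihres.1, hitems, pvShiftP (PySem.List.enumerate cs (k+1)) [(x,k)] st']
            simp
          · rw [ihres.2.1, pvShiftP (PySem.List.enumerate cs (k+1)) [(x,k)] st']
      · have hA : pvStepA (d, st) (k, c) = (d, st) := by simp [pvStepA, hc1, hc2]
        have hP : pvStepP ([], st) (k, c) = ([], st) := by simp [pvStepP, hc1, hc2]
        rw [hA, hP]
        exact ih (k+1) d st h1 h2 (fun x hx => lt_trans (h3 x hx) (by omega))
          (fun x hx => lt_trans (h4 x hx) (by omega)) h5

theorem pvPairwiseLt {α : Type} (f : α → Int) (l : List α)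
    (h1 : l.Pairwise (fun a b => f a ≤ f b)) (h2 : (l.map f).Nodup) :
    l.Pairwise (fun a b => f a < f b) := by
  induction l with
  | nil => simp
  | cons a l ih =>
    simp only [List.pairwise_cons] at h1 ⊢
    simp only [List.map_cons, List.nodup_cons] at h2
    refine ⟨fun b hb => lt_of_le_of_ne (h1.1 b hb) ?_, ih h1.2 h2.2⟩
    intro he; exact h2.1 (he ▸ List.mem_map_of_mem hb)

theorem pvTopB_stop (cs : List Char) (f i : Nat) (h : ¬ i < cs.length) :
    pvTopB cs f i = [] := by
  cases f with
  | zero => rfl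
  | succ f => simp [pvTopB, h]

theorem pvMain (cs : List Char)
    (hpre : ∀ k : Nat, k ≤ cs.length → (cs.take k).count ')' ≤ (cs.take k).count '(') :
    PySem.List.sorted
        (((PySem.List.enumerate cs 0).foldl pvStepA (PySem.Dict.empty, [])).1.items)
        (fun p => p.1) false
      = PySem.List.sorted
          ((pvTopB cs (cs.length + 1) 0).map (fun p => ((p.1 : Int), (p.2 : Int))))
          (fun p => p.1) false := by
  rcases hp : pvParseB cs (cs.length + 1) 0 with ⟨qs, j⟩
  have chunk := pvChunk cs (cs.length + 1) 0 [] (by omega) (by omega)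
  rw [hp] at chunk
  dsimp only at chunk
  obtain ⟨-, hjn, extra, he, hperm, hlt, hcnt⟩ := chunk
  -- under Pre_, the top-level parse consumes the whole string
  have hj : j = cs.length := by
    by_contra hne
    have hjlt : j < cs.length := lt_of_le_of_ne hjn hne
    obtain ⟨hex, hcj⟩ := hlt hjlt
    subst hex
    have hseg : pvSeg cs 0 j = cs.take j := by simp [pvSeg]
    rw [hseg] at hcnt
    have htake : cs.take (j+1) = cs.take j ++ [cs[j]] := by
      rw [List.take_add_one]; simp [List.getElem?_eq_getElem hjlt]
    have hp2 := hpre (j+1) (by omega)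
    rw [htake, List.count_append, List.count_append, hcj] at hp2
    have e1 : List.count ')' [')'] = 1 := by decide
    have e2 : List.count '(' [')'] = 0 := by decide
    rw [e1, e2] at hp2
    simp only [List.length_nil, Nat.add_zero] at hcnt
    omega
  subst hj
  -- B's top-level loop returns exactly that parse's pairs
  have htop : pvTopB cs (cs.length + 1) 0 = qs := by
    by_cases hn : 0 < cs.length
    · simp only [pvTopB, hn, if_pos, hp]
      rw [pvTopB_stop cs cs.length (cs.length + 1) (by omega)]
      simp
    · have h0 : pvParseB cs (cs.length + 1) 0 = ([], 0) := by
        simp [pvParseB, hn]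
      rw [h0] at hp
      injection hp with ha hb
      rw [pvTopB_stop cs _ 0 hn]
      exact ha
  -- A's loop: its dict's items are a permutation of those pairs, with distinct keys
  have habstr := pvAbstr cs 0 PySem.Dict.empty [] (by simp) (by
      simpa using PySem.Dict.nodup_keys_empty (κ := Int) (ν := Int)) (by simp) (by
      intro x hx; simp [PySem.Dict.keys_empty] at hx) (by simp)
  have heseg : pvESeg cs 0 cs.length = PySem.List.enumerate cs 0 := by
    simp [pvESeg, pvSeg]
  rw [heseg] at he hperm
  have hitems :
      ((PySem.List.enumerate cs 0).foldl pvStepA (PySem.Dict.empty, [])).1.items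
        = ((PySem.List.enumerate cs 0).foldl pvStepP ([], [])).1 := by
    rw [habstr.1]; simp [PySem.Dict.empty]
  have hpermA :
      ((PySem.List.enumerate cs 0).foldl pvStepA (PySem.Dict.empty, [])).1.items.Perm
        (qs.map (fun p => ((p.1 : Int), (p.2 : Int)))) := by
    rw [hitems]; exact hperm
  -- both sides sort a permutation of the same pair list by distinct first components
  set itemsA := ((PySem.List.enumerate cs 0).foldl pvStepA (PySem.Dict.empty, [])).1.items with hiA
  set qsI := qs.map (fun p => ((p.1 : Int), (p.2 : Int))) with hqI
  rw [htop]
  have hnodupA : (itemsA.map (fun p => p.1)).Nodup := by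
    have h := habstr.2.2
    simp only [PySem.Dict.keys] at h
    exact h
  have hys := PySem.List.sorted_perm qsI (fun p => p.1) false
  have hysA : (PySem.List.sorted qsI (fun p => p.1) false).Perm itemsA :=
    hys.trans hpermA.symm
  have hpw := PySem.List.sorted_pairwise qsI (fun p => p.1)
  have hnodupY : ((PySem.List.sorted qsI (fun p => p.1) false).map (fun p => p.1)).Nodup :=
    ((hysA.map (fun p => p.1)).nodup_iff).2 hnodupA
  have hlt := pvPairwiseLt (fun p => p.1) (PySem.List.sorted qsI (fun p => p.1) false) hpw hnodupY
  exact PySem.List.sorted_eq_of_perm_of_pairwise_lt itemsA _ (fun p => p.1) hysA hlt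

-- ===== VERDICT (by name: the statement is the Claim_ definition above) =====
theorem find_bracket_pairs_spec : Claim_equal_find_bracket_pairs := by
  intro s _ hpre
  unfold Spec_find_bracket_pairs find_bracket_pairs find_bracket_pairs_alt
  exact pvMain s.toList hpre
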